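-- pv_equiv track=rewrite | github.com/EternityForest/KaithemAutomation | kaithem/src/remotedevices.py | sqminify
-- ===== SOURCE A (Python) =====
-- def sqminify(code):
--     line = ''
--     lines = []
--     quote = False
--     for i in code:
--         if not quote and i=='\n':
--             lines.append(line)
--             line = ''
--         else:
--             line+= i
--         if i=='"':
--             quote = not quote
--     lines+= [line]
--     olines =[]
--     for i in lines:
--         x = i.strip()
--         if x.startswith("\\") or x.startswith("#"):
--             continue
--         if not x:
--             continue
--
--         #Pretty sure two statements like this can just be put together
--         if olines and olines[-1][-1] in ";}{" and x[-1] in ";}{":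
--             olines[-1]+=x
--             continue
--         #Put closing bracket on the line
--         if olines and x[0] =="{":
--             olines[-1]+=x
--             continue
--         olines.append(x)
--     return("\n".join(olines))
-- ===== SOURCE B (Python) =====
-- def sqminify(code):
--     # Single streaming pass: no intermediate list of lines and no list of output
--     # lines; the output is one growing string and lines are finalized on the fly.
--     def emit(out, buf):
--         x = buf.strip()
--         if not x or x[0] in '\\#':
--             return out
--         if out and out[-1] in ';}{' and x[-1] in ';}{':
--             return out + x
--         if out and x[0] == '{':
--             return out + x
--         return out + '\n' + x if out else x
--     out = ''
--     buf = ''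
--     quote = False
--     for ch in code:
--         if ch == '"':
--             buf += ch
--             quote = not quote
--         elif ch == '\n' and not quote:
--             out = emit(out, buf)
--             buf = ''
--         else:
--             buf += ch
--     return emit(out, buf)
-- ===== Notes on version B (the rewrite author's own statement) =====
-- stated objective: alternative
-- what changed: B fuses A's two phases into one streaming pass over the characters that finalizes each unquoted line directly into a single growing output string, eliminating both the intermediate list of lines and the list of output lines (and the final join).
import Mathlib
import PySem

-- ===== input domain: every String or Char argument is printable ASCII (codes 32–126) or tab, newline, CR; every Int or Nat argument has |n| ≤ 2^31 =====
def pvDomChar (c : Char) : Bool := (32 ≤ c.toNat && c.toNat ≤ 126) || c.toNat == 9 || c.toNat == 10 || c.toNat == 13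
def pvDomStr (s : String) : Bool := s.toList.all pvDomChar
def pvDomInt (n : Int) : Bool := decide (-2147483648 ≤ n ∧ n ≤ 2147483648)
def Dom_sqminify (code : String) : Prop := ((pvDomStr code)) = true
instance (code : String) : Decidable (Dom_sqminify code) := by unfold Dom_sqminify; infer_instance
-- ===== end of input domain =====

-- B fuses A's two phases into one streaming pass that finalizes each unquoted line
-- directly into a single growing output string (no intermediate lists, no final join).

-- ===== PORT A =====

-- c in ";}{"
def sqA_inSemi (c : Char) : Bool := c == ';' || c == '}' || c == '{'

-- phase-1 loop body: split on unquoted newlines, toggling quote on '"'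
def sqA_p1step (st : List Char × List (List Char) × Bool) (i : Char) :
    List Char × List (List Char) × Bool :=
  let line := st.1; let lines := st.2.1; let quote := st.2.2
  let (line, lines) := if !quote && i == '\n' then ([], lines ++ [line]) else (line ++ [i], lines)
  let quote := if i == '"' then !quote else quote
  (line, lines, quote)

-- phase-2 loop body over olines (olines[-1][-1]/x[0]/x[-1] are read with defaults;
-- Python never raises here: every stored output line is nonempty)
def sqA_p2step (olines : List (List Char)) (i : List Char) : List (List Char) :=
  let x := PySem.Chars.strip i
  if PySem.Chars.startswith x ['\\'] || PySem.Chars.startswith x ['#'] then olines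
  else if x.isEmpty then olines
  else if !olines.isEmpty && sqA_inSemi ((olines.getLastD []).getLastD ' ')
        && sqA_inSemi (x.getLastD ' ') then
    olines.dropLast ++ [olines.getLastD [] ++ x]
  else if !olines.isEmpty && (x.headD ' ' == '{') then
    olines.dropLast ++ [olines.getLastD [] ++ x]
  else olines ++ [x]

def sqminify (code : String) : String :=
  let st := code.toList.foldl sqA_p1step ([], [], false)
  let lines := st.2.1 ++ [st.1]
  let olines := lines.foldl sqA_p2step []
  (PySem.Chars.join ['\n'] olines).asString

-- ===== PORT B =====

-- c in ';}{'
def sqB_inSemi (c : Char) : Bool := c == ';' || c == '}' || c == '{'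

-- finalize one buffered line against the single output string
def sqB_emit (out buf : List Char) : List Char :=
  let x := PySem.Chars.strip buf
  if x.isEmpty || x.headD ' ' == '\\' || x.headD ' ' == '#' then out
  else if !out.isEmpty && sqB_inSemi (out.getLastD ' ') && sqB_inSemi (x.getLastD ' ') then out ++ x
  else if !out.isEmpty && x.headD ' ' == '{' then out ++ x
  else if !out.isEmpty then out ++ '\n' :: x else x

-- streaming loop body: state = (out, buf, quote)
def sqB_step (st : List Char × List Char × Bool) (ch : Char) : List Char × List Char × Bool :=
  let out := st.1; let buf := st.2.1; let quote := st.2.2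
  if ch == '"' then (out, buf ++ [ch], !quote)
  else if ch == '\n' && !quote then (sqB_emit out buf, [], quote)
  else (out, buf ++ [ch], quote)

def sqminify_alt (code : String) : String :=
  let st := code.toList.foldl sqB_step ([], [], false)
  (sqB_emit st.1 st.2.1).asString

-- ===== PRECONDITION & SPEC =====
def Spec_sqminify (code : String) (out : String) : Prop := out = sqminify_alt code
instance (code : String) (out : String) : Decidable (Spec_sqminify code out) := by unfold Spec_sqminify; infer_instance

-- ===== CLAIM (what is proved, stated in full; the proofs are below) =====
def Claim_equal_sqminify : Prop := ∀ (code : String), Dom_sqminify code → Spec_sqminify code (sqminify code)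

-- ===== LEMMAS AND PROOFS =====

-- beq on Char is symmetric (used to align x[0] in '\\#' with startswith)
lemma charBeq_comm (a b : Char) : (a == b) = (b == a) := by
  by_cases hab : a = b
  · subst hab; rfl
  · rw [beq_eq_false_iff_ne.mpr hab, beq_eq_false_iff_ne.mpr (Ne.symm hab)]

-- abbreviation for the proofs: phase 2 of A applied to a list of lines
def sqP2 (lines : List (List Char)) : List (List Char) := lines.foldl sqA_p2step []

def sqJ (olines : List (List Char)) : List Char := PySem.Chars.join ['\n'] olines

lemma sqJ_append_singleton (ol : List (List Char)) (x : List Char) :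
    sqJ (ol ++ [x]) = if ol.isEmpty then x else sqJ ol ++ '\n' :: x := by
  induction ol with
  | nil => simp [sqJ, PySem.Chars.join_singleton]
  | cons a l ih =>
    cases l with
    | nil => simp [sqJ, PySem.Chars.join_cons_cons, PySem.Chars.join_singleton]
    | cons b m =>
      simp only [List.cons_append, sqJ, PySem.Chars.join_cons_cons, List.isEmpty_cons] at *
      simp [ih]

lemma sqJ_isEmpty (ol : List (List Char)) (h : ∀ l ∈ ol, l ≠ []) :
    sqJ ol = [] ↔ ol = [] := by
  induction ol using List.reverseRecOn with
  | nil => simp [sqJ, PySem.Chars.join_nil]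
  | append_singleton l x ih =>
    rw [sqJ_append_singleton]
    have hx : x ≠ [] := h x (by simp)
    constructor
    · intro he
      by_cases hl : l.isEmpty
      · simp [hl] at he; exact absurd he hx
      · simp [hl] at he
    · intro he; simp at he

lemma sqJ_getLast (ol : List (List Char)) (x : List Char) (hx : x ≠ []) :
    (sqJ (ol ++ [x])).getLastD ' ' = x.getLastD ' ' := by
  rw [sqJ_append_singleton]
  by_cases h : (ol.isEmpty) = true
  · simp [h]
  · rw [if_neg h]
    cases x with
    | nil => exact absurd rfl hx
    | cons c cs =>
      rw [List.getLastD_eq_getLast?, List.getLast?_append, List.getLastD_eq_getLast?]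
      cases hlast : (c :: cs).getLast? with
      | none => simp [List.getLast?_eq_none_iff] at hlast
      | some y => simp [List.getLast?_cons_cons, hlast]

lemma sqJ_merge (ol : List (List Char)) (x y : List Char) :
    sqJ ((ol ++ [x]).dropLast ++ [(ol ++ [x]).getLastD [] ++ y]) = sqJ (ol ++ [x]) ++ y := by
  have h1 : (ol ++ [x]).dropLast = ol := by simp
  have h2 : (ol ++ [x]).getLastD [] = x := by
    rw [List.getLastD_eq_getLast?, List.getLast?_append] <;> simp
  rw [h1, h2, sqJ_append_singleton, sqJ_append_singleton]
  by_cases h : ol.isEmpty <;> simp [h]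

-- the fused emit equals join ∘ phase-2 step, and phase 2 preserves nonemptiness of lines
lemma emit_step (ol : List (List Char)) (i : List Char) (h : ∀ l ∈ ol, l ≠ []) :
    sqB_emit (sqJ ol) i = sqJ (sqA_p2step ol i) ∧ ∀ l ∈ sqA_p2step ol i, l ≠ [] := by
  unfold sqB_emit sqA_p2step
  dsimp only
  generalize PySem.Chars.strip i = x
  have hskip : (x.isEmpty || x.headD ' ' == '\\' || x.headD ' ' == '#') =
      (PySem.Chars.startswith x ['\\'] || PySem.Chars.startswith x ['#'] || x.isEmpty) := by
    cases x with
    | nil => simp [PySem.Chars.startswith]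
    | cons c cs =>
      by_cases h1 : c = '\\' <;> by_cases h2 : c = '#' <;>
        simp [PySem.Chars.startswith, List.headD, List.isPrefixOf, h1, h2, charBeq_comm]
  by_cases hsk : (PySem.Chars.startswith x ['\\'] || PySem.Chars.startswith x ['#']) = true
  · rw [if_pos hsk]
    have hb : (x.isEmpty || x.headD ' ' == '\\' || x.headD ' ' == '#') = true := by rw [hskip]; simp [hsk]
    rw [if_pos hb]; exact ⟨rfl, h⟩
  · simp only [Bool.not_eq_true] at hsk
    rw [if_neg (show ¬ (PySem.Chars.startswith x ['\\'] || PySem.Chars.startswith x ['#']) = true by simp [hsk])]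
    by_cases hxe : x.isEmpty = true
    · have hb : (x.isEmpty || x.headD ' ' == '\\' || x.headD ' ' == '#') = true := by simp [hxe]
      rw [if_pos hb, if_pos hxe]; exact ⟨rfl, h⟩
    · have hxne : x ≠ [] := by simpa [List.isEmpty_iff] using hxe
      have hb : (x.isEmpty || x.headD ' ' == '\\' || x.headD ' ' == '#') = false := by
        rw [hskip]; simp [hsk, hxe]
      rw [if_neg (show ¬ (x.isEmpty || x.headD ' ' == '\\' || x.headD ' ' == '#') = true by
            simp only [hb]; exact Bool.false_ne_true),
          if_neg (show ¬ x.isEmpty = true from hxe)]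
      -- nonemptiness of the guards: relate out = sqJ ol with ol
      have hje : (sqJ ol).isEmpty = ol.isEmpty := by
        by_cases ho : ol = []
        · simp [ho, sqJ, PySem.Chars.join_nil]
        · have hne := (sqJ_isEmpty ol h).not.mpr ho
          have h1 : (sqJ ol).isEmpty = false := by
            cases hq : sqJ ol with
            | nil => exact absurd hq hne
            | cons a as => rfl
          have h2 : ol.isEmpty = false := by
            cases ol with
            | nil => exact absurd rfl ho
            | cons a as => rfl
          rw [h1, h2]
      by_cases ho : ol = []
      · subst ho
        have hjnil : sqJ ([] : List (List Char)) = [] := by simp [sqJ, PySem.Chars.join_nil]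
        rw [hjnil]
        simp only [List.isEmpty_nil, Bool.not_true, Bool.false_and, Bool.false_eq_true, if_false,
          List.nil_append]
        refine ⟨?_, ?_⟩
        · simp [sqJ, PySem.Chars.join_singleton]
        · intro l hl
          simp at hl; subst hl; exact hxne
      · obtain ⟨ol', last, rfl⟩ := (List.eq_nil_or_concat ol).resolve_left ho
        simp only [List.concat_eq_append] at h hje ho ⊢
        have hlast : last ≠ [] := h last (by simp)
        have hgl : (sqJ (ol' ++ [last])).getLastD ' ' = (((ol' ++ [last]).getLastD []).getLastD ' ') := by
          rw [sqJ_getLast ol' last hlast]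
          congr 1
          rw [List.getLastD_eq_getLast?, List.getLast?_append] <;> simp
        have hone : ((ol' ++ [last]).isEmpty) = false := by simp
        have hjne : ((sqJ (ol' ++ [last])).isEmpty) = false := by rw [hje, hone]
        rw [hjne, hone, hgl]
        simp only [Bool.not_false, Bool.true_and]
        have hmerge_ne : ∀ l ∈ (ol' ++ [last]).dropLast ++ [(ol' ++ [last]).getLastD [] ++ x], l ≠ [] := by
          intro l hl
          simp only [List.dropLast_concat] at hl
          rcases List.mem_append.mp hl with hl | hl
          · exact h l (by simp [hl])
          · simp at hl; subst hl; simp [hlast]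
        have happ_ne : ∀ l ∈ (ol' ++ [last]) ++ [x], l ≠ [] := by
          intro l hl
          rcases List.mem_append.mp hl with hl | hl
          · exact h l hl
          · simp at hl; exact hl ▸ hxne
        by_cases hm : (sqB_inSemi (((ol' ++ [last]).getLastD []).getLastD ' ') && sqB_inSemi (x.getLastD ' ')) = true
        · rw [if_pos hm,
              if_pos (show (sqA_inSemi (((ol' ++ [last]).getLastD []).getLastD ' ') && sqA_inSemi (x.getLastD ' ')) = true from hm)]
          exact ⟨(sqJ_merge ol' last x).symm, hmerge_ne⟩
        · rw [if_neg hm,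
              if_neg (show ¬ (sqA_inSemi (((ol' ++ [last]).getLastD []).getLastD ' ') && sqA_inSemi (x.getLastD ' ')) = true from hm)]
          by_cases hbr : (x.headD ' ' == '{') = true
          · rw [if_pos hbr, if_pos hbr]
            exact ⟨(sqJ_merge ol' last x).symm, hmerge_ne⟩
          · rw [if_neg hbr, if_neg hbr, if_pos trivial]
            refine ⟨?_, happ_ne⟩
            rw [sqJ_append_singleton ((ol' ++ [last])) x, hone]
            simp
  
-- the streaming loop tracks (join (phase2 lines), line, quote) of A's phase-1 state
lemma loop_inv (cs : List Char) (line : List Char) (lines : List (List Char)) (quote : Bool)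
    (h : ∀ l ∈ sqP2 lines, l ≠ []) :
    cs.foldl sqB_step (sqJ (sqP2 lines), line, quote) =
      (sqJ (sqP2 (cs.foldl sqA_p1step (line, lines, quote)).2.1),
       (cs.foldl sqA_p1step (line, lines, quote)).1,
       (cs.foldl sqA_p1step (line, lines, quote)).2.2)
    ∧ ∀ l ∈ sqP2 (cs.foldl sqA_p1step (line, lines, quote)).2.1, l ≠ [] := by
  induction cs generalizing line lines quote with
  | nil => exact ⟨rfl, h⟩
  | cons c cs ih =>
    simp only [List.foldl_cons]
    by_cases hq : c = '"'
    · subst hq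
      have hA : sqA_p1step (line, lines, quote) '"' = (line ++ ['"'], lines, !quote) := by
        simp [sqA_p1step]
      have hB : sqB_step (sqJ (sqP2 lines), line, quote) '"' = (sqJ (sqP2 lines), line ++ ['"'], !quote) := by
        simp [sqB_step]
      rw [hA, hB]; exact ih _ _ _ h
    · by_cases hn : (c = '\n' ∧ quote = false)
      · obtain ⟨rfl, rfl⟩ := hn
        have hA : sqA_p1step (line, lines, false) '\n' = ([], lines ++ [line], false) := by
          simp [sqA_p1step]
        have hstep : sqP2 (lines ++ [line]) = sqA_p2step (sqP2 lines) line := by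
          simp [sqP2]
        obtain ⟨he, hne⟩ := emit_step (sqP2 lines) line h
        have hB : sqB_step (sqJ (sqP2 lines), line, false) '\n' = (sqJ (sqP2 (lines ++ [line])), [], false) := by
          simp [sqB_step, he, hstep]
        rw [hA, hB]
        exact ih _ _ _ (hstep ▸ hne)
      · have hA : sqA_p1step (line, lines, quote) c = (line ++ [c], lines, quote) := by
          rcases Bool.eq_false_or_eq_true quote with hq' | hq'
          · subst hq'; simp [sqA_p1step, hq]
          · subst hq'
            have : ¬ (c = '\n') := fun hc => hn ⟨hc, rfl⟩
            simp [sqA_p1step, this, hq]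
        have hB : sqB_step (sqJ (sqP2 lines), line, quote) c = (sqJ (sqP2 lines), line ++ [c], quote) := by
          rcases Bool.eq_false_or_eq_true quote with hq' | hq'
          · subst hq'; simp [sqB_step, hq]
          · subst hq'
            have : ¬ (c = '\n') := fun hc => hn ⟨hc, rfl⟩
            simp [sqB_step, this, hq]
        rw [hA, hB]; exact ih _ _ _ h

-- ===== VERDICT (by name: the statement is the Claim_ definition above) =====
theorem sqminify_spec : Claim_equal_sqminify := by
  intro code _
  unfold Spec_sqminify sqminify sqminify_alt
  dsimp only
  have h0 : ∀ l ∈ sqP2 [], l ≠ [] := by simp [sqP2]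
  obtain ⟨hinv, hne⟩ := loop_inv code.toList [] [] false h0
  have hstart : sqJ (sqP2 ([] : List (List Char))) = [] := by
    simp [sqP2, sqJ, PySem.Chars.join_nil]
  rw [hstart] at hinv
  rw [hinv]
  obtain ⟨he, -⟩ := emit_step (sqP2 (code.toList.foldl sqA_p1step ([], [], false)).2.1)
      (code.toList.foldl sqA_p1step ([], [], false)).1 hne
  dsimp only
  rw [he]
  have hfold : ((code.toList.foldl sqA_p1step ([], [], false)).2.1 ++
      [(code.toList.foldl sqA_p1step ([], [], false)).1]).foldl sqA_p2step [] =
      sqA_p2step (sqP2 (code.toList.foldl sqA_p1step ([], [], false)).2.1)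
        (code.toList.foldl sqA_p1step ([], [], false)).1 := by
    simp [sqP2]
  rw [hfold]
  rfl
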